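-- pv_equiv track=rewrite | github.com/balamogoulish/coding-test | 프로그래머스/2/87946. 피로도/피로도.py | solution
-- ===== SOURCE A (Python) =====
-- from itertools import permutations
--
-- def solution(k, dungeons):
--     answer = 0
--     dungeons = permutations(dungeons, len(dungeons))
--
--     for dungeon in dungeons:
--         cnt = 0
--         tired = k
--         for d in dungeon:
--             limit, pay = d
--             if tired>=limit:
--                 tired-=pay
--                 cnt+=1
--         answer = max(cnt, answer)
--
--     return answer
-- ===== SOURCE B (Python) =====
-- def solution(k, dungeons):
--     # DFS with backtracking over remaining dungeons instead of enumerating all n! orderings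
--     def dfs(tired, rem):
--         best = 0
--         for i, (limit, pay) in enumerate(rem):
--             if limit <= tired:
--                 best = max(best, 1 + dfs(tired - pay, rem[:i] + rem[i+1:]))
--         return best
--     return dfs(k, dungeons)
-- ===== Notes on version B (the rewrite author's own statement) =====
-- stated objective: alternative
-- what changed: Replaced the enumeration of all n! orderings with a recursive DFS with backtracking that branches only on dungeons clearable at the current stamina, pruning orderings with unclearable prefixes.
import Mathlib
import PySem

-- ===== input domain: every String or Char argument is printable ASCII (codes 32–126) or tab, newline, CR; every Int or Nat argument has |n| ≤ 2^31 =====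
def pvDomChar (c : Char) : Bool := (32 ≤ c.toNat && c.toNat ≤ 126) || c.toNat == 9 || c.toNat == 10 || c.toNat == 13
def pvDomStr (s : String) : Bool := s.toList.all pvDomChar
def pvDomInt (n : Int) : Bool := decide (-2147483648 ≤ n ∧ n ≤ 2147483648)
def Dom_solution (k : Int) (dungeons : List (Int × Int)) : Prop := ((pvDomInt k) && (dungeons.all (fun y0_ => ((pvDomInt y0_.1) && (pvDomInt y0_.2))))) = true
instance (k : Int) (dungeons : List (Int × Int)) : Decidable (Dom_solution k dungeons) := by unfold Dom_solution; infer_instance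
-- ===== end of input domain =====

-- B replaces A's enumeration of all n! orderings by a recursive DFS with backtracking
-- that only branches on dungeons clearable at the current stamina.

-- ===== PORT A =====
-- literal port of A: fold over itertools.permutations(dungeons, len(dungeons)),
-- inner loop carries (cnt, tired), answer = max(cnt, answer)
def solution (k : Int) (dungeons : List (Int × Int)) : Int :=
  (PySem.List.permutations dungeons dungeons.length).foldl
    (fun answer dungeon =>
      max (dungeon.foldl
        (fun (ct : Int × Int) d => if ct.2 ≥ d.1 then (ct.1 + 1, ct.2 - d.2) else ct) (0, k)).1
        answer) 0

-- ===== PORT B =====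
-- pvPicks rem = the list of (rem[i], rem[:i] + rem[i+1:]) in index order (B's enumerate loop)
def pvPicks : List (Int × Int) → List ((Int × Int) × List (Int × Int))
  | [] => []
  | x :: xs => (x, xs) :: (pvPicks xs).map (fun p => (p.1, x :: p.2))

-- termination fact for the DFS (cited by decreasing_by)
theorem pvPicks_length : ∀ (l : List (Int × Int)) (p : (Int × Int) × List (Int × Int)),
    p ∈ pvPicks l → p.2.length < l.length := by
  intro l
  induction l with
  | nil => intro p h; simp [pvPicks] at h
  | cons x xs ih =>
      intro p h
      simp only [pvPicks, List.mem_cons, List.mem_map] at h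
      rcases h with h | ⟨q, hq, rfl⟩
      · subst h; simp
      · have := ih q hq; simp; omega

-- DFS with backtracking: best over clearable first picks, accumulated through the fold
def solution_alt (k : Int) (dungeons : List (Int × Int)) : Int :=
  (pvPicks dungeons).attach.foldl
    (fun best p =>
      if p.1.1.1 ≤ k then max best (1 + solution_alt (k - p.1.1.2) p.1.2) else best) 0
termination_by dungeons.length
decreasing_by exact pvPicks_length dungeons p.1 p.2

-- ===== PRECONDITION & SPEC =====
def Spec_solution (k : Int) (dungeons : List (Int × Int)) (out : Int) : Prop := out = solution_alt k dungeons
instance (k : Int) (dungeons : List (Int × Int)) (out : Int) : Decidable (Spec_solution k dungeons out) := by unfold Spec_solution; infer_instance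

-- ===== CLAIM (what is proved, stated in full; the proofs are below) =====
def Claim_equal_solution : Prop := ∀ (k : Int) (dungeons : List (Int × Int)), Dom_solution k dungeons → Spec_solution k dungeons (solution k dungeons)

-- ===== LEMMAS AND PROOFS =====

-- A's inner loop, recursively: number cleared scanning the ordering left to right
def pvScan : Int → List (Int × Int) → Int
  | _, [] => 0
  | t, d :: p => if t ≥ d.1 then 1 + pvScan (t - d.2) p else pvScan t p

theorem pvScan_nonneg : ∀ (t : Int) (p : List (Int × Int)), 0 ≤ pvScan t p := by
  intro t p
  induction p generalizing t with
  | nil => simp [pvScan]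
  | cons d p ih =>
      simp only [pvScan]
      split
      · have := ih (t - d.2); omega
      · exact ih t

-- bridge: A's inner foldl computes pvScan
theorem pvScan_foldl : ∀ (p : List (Int × Int)) (c t : Int),
    (p.foldl (fun (ct : Int × Int) d => if ct.2 ≥ d.1 then (ct.1 + 1, ct.2 - d.2) else ct) (c, t)).1
      = c + pvScan t p := by
  intro p
  induction p with
  | nil => intro c t; simp [pvScan]
  | cons d p ih =>
      intro c t
      simp only [List.foldl_cons, pvScan]
      split
      · rw [ih]; ring
      · rw [ih]

-- generic facts about A's outer max-fold
theorem pvFoldMax_le {α : Type} (v : α → Int) (B : Int) :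
    ∀ (xs : List α) (a : Int), (∀ x ∈ xs, v x ≤ B) → a ≤ B →
      xs.foldl (fun b x => max (v x) b) a ≤ B := by
  intro xs
  induction xs with
  | nil => intro a _ ha; simpa using ha
  | cons x xs ih =>
      intro a h ha
      simp only [List.foldl_cons]
      exact ih _ (fun y hy => h y (List.mem_cons_of_mem _ hy))
        (max_le (h x List.mem_cons_self) ha)

theorem pvFoldMax_ge_init {α : Type} (v : α → Int) :
    ∀ (xs : List α) (a : Int), a ≤ xs.foldl (fun b x => max (v x) b) a := by
  intro xs
  induction xs with
  | nil => intro a; simp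
  | cons x xs ih =>
      intro a
      simp only [List.foldl_cons]
      exact le_trans (le_max_right _ _) (ih _)

theorem pvFoldMax_ge {α : Type} (v : α → Int) :
    ∀ (xs : List α) (a : Int) (x : α), x ∈ xs →
      v x ≤ xs.foldl (fun b y => max (v y) b) a := by
  intro xs
  induction xs with
  | nil => intro a x hx; simp at hx
  | cons y ys ih =>
      intro a x hx
      simp only [List.foldl_cons]
      rcases List.mem_cons.mp hx with rfl | hx
      · exact le_trans (le_max_left _ _) (pvFoldMax_ge_init v ys _)
      · exact ih _ x hx

-- generic facts about B's guarded max-fold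
theorem pvIfMax_ge_init {α : Type} (c : α → Prop) [DecidablePred c] (v : α → Int) :
    ∀ (xs : List α) (a : Int),
      a ≤ xs.foldl (fun b x => if c x then max b (v x) else b) a := by
  intro xs
  induction xs with
  | nil => intro a; simp
  | cons x xs ih =>
      intro a
      simp only [List.foldl_cons]
      split
      · exact le_trans (le_max_left _ _) (ih _)
      · exact ih _

theorem pvIfMax_ge {α : Type} (c : α → Prop) [DecidablePred c] (v : α → Int) :
    ∀ (xs : List α) (a : Int) (x : α), x ∈ xs → c x →
      v x ≤ xs.foldl (fun b y => if c y then max b (v y) else b) a := by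
  intro xs
  induction xs with
  | nil => intro a x hx; simp at hx
  | cons y ys ih =>
      intro a x hx hc
      simp only [List.foldl_cons]
      rcases List.mem_cons.mp hx with rfl | hx'
      · simp only [if_pos hc]
        exact le_trans (le_max_right _ _) (pvIfMax_ge_init c v ys _)
      · split
        · exact ih _ x hx' hc
        · exact ih _ x hx' hc

theorem pvIfMax_cases {α : Type} (c : α → Prop) [DecidablePred c] (v : α → Int) :
    ∀ (xs : List α) (a : Int),
      xs.foldl (fun b x => if c x then max b (v x) else b) a = a ∨
        ∃ x ∈ xs, c x ∧ xs.foldl (fun b x => if c x then max b (v x) else b) a = v x := by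
  intro xs
  induction xs with
  | nil => intro a; left; simp
  | cons y ys ih =>
      intro a
      simp only [List.foldl_cons]
      by_cases hc : c y
      · simp only [if_pos hc]
        rcases ih (max a (v y)) with h | ⟨x, hx, hcx, h⟩
        · rcases max_cases a (v y) with ⟨he, _⟩ | ⟨he, _⟩
          · left; rw [h, he]
          · right; exact ⟨y, List.mem_cons_self, hc, by rw [h, he]⟩
        · right; exact ⟨x, List.mem_cons_of_mem _ hx, hcx, h⟩
      · simp only [if_neg hc]
        rcases ih a with h | ⟨x, hx, hcx, h⟩
        · left; exact h
        · right; exact ⟨x, List.mem_cons_of_mem _ hx, hcx, h⟩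

-- solution_alt's defining equation, named
theorem solution_alt_eq (k : Int) (l : List (Int × Int)) :
    solution_alt k l =
      (pvPicks l).attach.foldl
        (fun best p =>
          if p.1.1.1 ≤ k then max best (1 + solution_alt (k - p.1.1.2) p.1.2) else best) 0 := by
  rw [solution_alt]

theorem solution_alt_nonneg (k : Int) (l : List (Int × Int)) : 0 ≤ solution_alt k l := by
  rw [solution_alt_eq]
  exact pvIfMax_ge_init _ _ _ _

theorem solution_alt_nil (k : Int) : solution_alt k [] = 0 := by
  rw [solution_alt_eq]; simp [pvPicks]

theorem solution_alt_ge (k : Int) (l : List (Int × Int)) (d : Int × Int)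
    (rest : List (Int × Int)) (hm : (d, rest) ∈ pvPicks l) (hc : d.1 ≤ k) :
    1 + solution_alt (k - d.2) rest ≤ solution_alt k l := by
  conv_rhs => rw [solution_alt_eq]
  exact pvIfMax_ge (fun p : {x // x ∈ pvPicks l} => p.1.1.1 ≤ k)
    (fun p => 1 + solution_alt (k - p.1.1.2) p.1.2) (pvPicks l).attach 0 ⟨(d, rest), hm⟩
    (List.mem_attach _ _) hc

theorem solution_alt_cases (k : Int) (l : List (Int × Int)) :
    solution_alt k l = 0 ∨
      ∃ d rest, (d, rest) ∈ pvPicks l ∧ d.1 ≤ k ∧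
        solution_alt k l = 1 + solution_alt (k - d.2) rest := by
  rw [solution_alt_eq]
  rcases pvIfMax_cases (fun p : {x // x ∈ pvPicks l} => p.1.1.1 ≤ k)
      (fun p => 1 + solution_alt (k - p.1.1.2) p.1.2) (pvPicks l).attach 0 with
    h | ⟨x, _, hcx, h⟩
  · left; exact h
  · right; exact ⟨x.1.1, x.1.2, by simpa using x.2, hcx, h⟩

-- characterization of pvPicks
theorem pvPicks_iff : ∀ (l rest : List (Int × Int)) (d : Int × Int),
    (d, rest) ∈ pvPicks l ↔ ∃ l1 l2, l = l1 ++ d :: l2 ∧ rest = l1 ++ l2 := by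
  intro l
  induction l with
  | nil => intro rest d; simp [pvPicks]
  | cons x xs ih =>
      intro rest d
      simp only [pvPicks, List.mem_cons, List.mem_map]
      constructor
      · rintro (h | ⟨q, hq, h⟩)
        · injection h with h1 h2
          exact ⟨[], xs, by simp [h1], by simp [h2]⟩
        · rcases (ih q.2 q.1).mp (by simpa using hq) with ⟨l1, l2, h1, h2⟩
          injection h with h3 h4
          subst h3
          exact ⟨x :: l1, l2, by simp [h1], by simp [← h4, h2]⟩
      · rintro ⟨l1, l2, h1, h2⟩
        cases l1 with
        | nil =>
            left
            simp only [List.nil_append] at h1 h2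
            injection h1 with h3 h4
            simp [h3, h4, h2]
        | cons y l1 =>
            right
            simp only [List.cons_append] at h1
            injection h1 with h3 h4
            refine ⟨(d, l1 ++ l2), (ih _ _).mpr ⟨l1, l2, h4, rfl⟩, ?_⟩
            simp [h2, h3]

theorem pvPicks_perm (l : List (Int × Int)) (d : Int × Int) (rest : List (Int × Int))
    (h : (d, rest) ∈ pvPicks l) : (d :: rest).Perm l := by
  rcases (pvPicks_iff l rest d).mp h with ⟨l1, l2, rfl, rfl⟩
  exact List.perm_middle.symm

theorem pvPicks_of_mem (l : List (Int × Int)) (d : Int × Int) (h : d ∈ l) :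
    ∃ rest, (d, rest) ∈ pvPicks l := by
  rcases List.append_of_mem h with ⟨s, t, rfl⟩
  exact ⟨s ++ t, (pvPicks_iff _ _ _).mpr ⟨s, t, rfl, rfl⟩⟩

-- permutation invariance of the DFS
theorem solution_alt_perm_le : ∀ (n : ℕ) (l l' : List (Int × Int)) (k : Int),
    l.length ≤ n → l.Perm l' → solution_alt k l ≤ solution_alt k l' := by
  intro n
  induction n with
  | zero =>
      intro l l' k hn hp
      have hl : l = [] := List.length_eq_zero_iff.mp (Nat.le_zero.mp hn)
      subst hl
      have hl' : l' = [] := (List.Perm.nil_eq hp).symm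
      subst hl'
      exact le_refl _
  | succ n ih =>
      intro l l' k hn hp
      rcases solution_alt_cases k l with h0 | ⟨d, rest, hm, hc, heq⟩
      · rw [h0]; exact solution_alt_nonneg k l'
      · have hd : d ∈ l := (pvPicks_perm l d rest hm).mem_iff.mp List.mem_cons_self
        have hd' : d ∈ l' := hp.mem_iff.mp hd
        rcases pvPicks_of_mem l' d hd' with ⟨rest', hm'⟩
        have hperm : rest.Perm rest' :=
          List.Perm.cons_inv (((pvPicks_perm l d rest hm).trans hp).trans
            (pvPicks_perm l' d rest' hm').symm)
        have hlen : rest.length ≤ n := by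
          have := pvPicks_length l (d, rest) hm; simp at this; omega
        calc solution_alt k l = 1 + solution_alt (k - d.2) rest := heq
          _ ≤ 1 + solution_alt (k - d.2) rest' := by
              have := ih rest rest' (k - d.2) hlen hperm; omega
          _ ≤ solution_alt k l' := solution_alt_ge k l' d rest' hm' hc

theorem solution_alt_perm (l l' : List (Int × Int)) (k : Int)
    (hp : l.Perm l') : solution_alt k l = solution_alt k l' := by
  exact le_antisymm (solution_alt_perm_le l.length l l' k le_rfl hp)
    (solution_alt_perm_le l'.length l' l k le_rfl hp.symm)

-- adding a dungeon can only help
theorem solution_alt_cons_le : ∀ (n : ℕ) (l : List (Int × Int)) (x : Int × Int) (k : Int),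
    l.length ≤ n → solution_alt k l ≤ solution_alt k (x :: l) := by
  intro n
  induction n with
  | zero =>
      intro l x k hn
      have hl : l = [] := List.length_eq_zero_iff.mp (Nat.le_zero.mp hn)
      subst hl
      rw [solution_alt_nil]
      exact solution_alt_nonneg k [x]
  | succ n ih =>
      intro l x k hn
      rcases solution_alt_cases k l with h0 | ⟨d, rest, hm, hc, heq⟩
      · rw [h0]; exact solution_alt_nonneg k (x :: l)
      · rcases (pvPicks_iff l rest d).mp hm with ⟨l1, l2, hl, hr⟩
        have hm' : (d, x :: rest) ∈ pvPicks (x :: l) :=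
          (pvPicks_iff _ _ _).mpr ⟨x :: l1, l2, by simp [hl], by simp [hr]⟩
        have hlen : rest.length ≤ n := by
          have := pvPicks_length l (d, rest) hm; simp at this; omega
        calc solution_alt k l = 1 + solution_alt (k - d.2) rest := heq
          _ ≤ 1 + solution_alt (k - d.2) (x :: rest) := by
              have := ih rest x (k - d.2) hlen; omega
          _ ≤ solution_alt k (x :: l) := solution_alt_ge k (x :: l) d (x :: rest) hm' hc

-- every ordering's greedy scan is at most the DFS optimum
theorem pvScan_le_alt : ∀ (n : ℕ) (p l : List (Int × Int)) (k : Int),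
    p.length ≤ n → p.Perm l → pvScan k p ≤ solution_alt k l := by
  intro n
  induction n with
  | zero =>
      intro p l k hn hp
      have : p = [] := List.length_eq_zero_iff.mp (Nat.le_zero.mp hn)
      subst this
      simpa [pvScan] using solution_alt_nonneg k l
  | succ n ih =>
      intro p l k hn hp
      cases p with
      | nil => simpa [pvScan] using solution_alt_nonneg k l
      | cons d p' =>
          rw [solution_alt_perm l (d :: p') k hp.symm]
          have hm : (d, p') ∈ pvPicks (d :: p') := by simp [pvPicks]
          simp only [pvScan]
          split
          · rename_i hc
            calc 1 + pvScan (k - d.2) p' ≤ 1 + solution_alt (k - d.2) p' := by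
                  have := ih p' p' (k - d.2) (by simpa using hn) (List.Perm.refl p'); omega
              _ ≤ solution_alt k (d :: p') := solution_alt_ge k (d :: p') d p' hm hc
          · calc pvScan k p' ≤ solution_alt k p' :=
                  ih p' p' k (by simpa using hn) (List.Perm.refl p')
              _ ≤ solution_alt k (d :: p') := solution_alt_cons_le p'.length p' d k le_rfl

-- the DFS optimum is realized by some ordering's greedy scan
theorem alt_le_pvScan : ∀ (n : ℕ) (l : List (Int × Int)) (k : Int), l.length ≤ n →
    ∃ p, p.Perm l ∧ solution_alt k l ≤ pvScan k p := by
  intro n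
  induction n with
  | zero =>
      intro l k hn
      have : l = [] := List.length_eq_zero_iff.mp (Nat.le_zero.mp hn)
      subst this
      exact ⟨[], List.Perm.refl _, by simp [pvScan, solution_alt_nil]⟩
  | succ n ih =>
      intro l k hn
      rcases solution_alt_cases k l with h0 | ⟨d, rest, hm, hc, heq⟩
      · exact ⟨l, List.Perm.refl _, h0 ▸ pvScan_nonneg k l⟩
      · have hlen : rest.length ≤ n := by
          have := pvPicks_length l (d, rest) hm; simp at this; omega
        rcases ih rest (k - d.2) hlen with ⟨p', hp', hle⟩
        refine ⟨d :: p', (hp'.cons d).trans (pvPicks_perm l d rest hm), ?_⟩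
        have : pvScan k (d :: p') = 1 + pvScan (k - d.2) p' := by
          simp [pvScan, hc]
        omega

-- completeness of PySem.List.permutations: every reordering occurs in the list
theorem perm_mem_permutations : ∀ (p l : List (Int × Int)), p.Perm l →
    p ∈ PySem.List.permutations l l.length := by
  intro p
  induction p with
  | nil =>
      intro l h
      have : l = [] := (List.Perm.nil_eq h).symm
      subst this
      simp [PySem.List.permutations_zero]
  | cons a p' ih =>
      intro l h
      have ha : a ∈ l := h.mem_iff.mp List.mem_cons_self
      have hperm : p'.Perm (l.erase a) :=
        List.Perm.cons_inv (h.trans (List.perm_cons_erase ha))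
      have hmem : p' ∈ PySem.List.permutations (l.erase a) (l.erase a).length := ih _ hperm
      have hlen : (l.erase a).length = l.length - 1 := List.length_erase_of_mem ha
      have hpos : 0 < l.length := List.length_pos_of_mem ha
      obtain ⟨m, hm⟩ : ∃ m, l.length = m + 1 := ⟨l.length - 1, by omega⟩
      rw [hm, PySem.List.permutations]
      refine List.mem_flatMap.mpr ⟨l.idxOf a, ?_, ?_⟩
      · simp only [List.mem_range]
        exact List.idxOf_lt_length_of_mem ha
      · rw [List.getElem?_idxOf ha]
        refine List.mem_map.mpr ⟨p', ?_, rfl⟩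
        rw [List.eraseIdx_idxOf_eq_erase]
        have : (l.erase a).length = m := by omega
        rwa [this] at hmem

-- ===== VERDICT (by name: the statement is the Claim_ definition above) =====
set_option maxHeartbeats 1000000 in
theorem solution_spec : Claim_equal_solution := by
  intro k l _
  unfold Spec_solution solution
  apply le_antisymm
  · refine pvFoldMax_le
      (fun dungeon : List (Int × Int) => (dungeon.foldl
        (fun (ct : Int × Int) d => if ct.2 ≥ d.1 then (ct.1 + 1, ct.2 - d.2) else ct) (0, k)).1)
      (solution_alt k l) (PySem.List.permutations l l.length) 0 ?_ ?_
    · intro p hp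
      simp only [pvScan_foldl p 0 k, zero_add]
      exact pvScan_le_alt p.length p l k le_rfl
        (PySem.List.perm_of_mem_permutations hp)
    · exact solution_alt_nonneg k l
  · rcases alt_le_pvScan l.length l k le_rfl with ⟨p, hp, hle⟩
    have hmem : p ∈ PySem.List.permutations l l.length := perm_mem_permutations p l hp
    have := pvFoldMax_ge
      (fun dungeon : List (Int × Int) => (dungeon.foldl
        (fun (ct : Int × Int) d => if ct.2 ≥ d.1 then (ct.1 + 1, ct.2 - d.2) else ct) (0, k)).1)
      (PySem.List.permutations l l.length) 0 p hmem
    simp only [pvScan_foldl p 0 k, zero_add] at this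
    exact le_trans hle this
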